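-- pv_equiv track=rewrite | github.com/mahnoorkhalid8/hackathon-0 | silver-tier/approval_system.py | _contains_pii
-- ===== SOURCE A (Python) =====
-- def _contains_pii(content: str) -> bool:
--     """Check if content contains PII."""
--     # Simplified PII detection
--     pii_patterns = [
--         "ssn", "social security",
--         "credit card", "card number",
--         "password", "secret",
--         "bank account"
--     ]
--
--     content_lower = content.lower()
--     return any(pattern in content_lower for pattern in pii_patterns)
-- ===== SOURCE B (Python) =====
-- PII_PATTERNS = [
--     "ssn", "social security",
--     "credit card", "card number",
--     "password", "secret",
--     "bank account"
-- ]
--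
--
-- def _contains_pii(content: str) -> bool:
--     """Single left-to-right scan: at each position, try to match any PII
--     phrase case-insensitively in place (no lowered copy, no per-pattern
--     full scans)."""
--     n = len(content)
--     for i in range(n):
--         for p in PII_PATTERNS:
--             if i + len(p) <= n and all(content[i + k].lower() == p[k] for k in range(len(p))):
--                 return True
--     return False
-- ===== Notes on version B (the rewrite author's own statement) =====
-- stated objective: alternative
-- what changed: Seven independent substring scans over a lowercased copy are replaced by one left-to-right position scan that tries to match each phrase case-insensitively in place, with no lowered copy of the string.
import Mathlib
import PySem

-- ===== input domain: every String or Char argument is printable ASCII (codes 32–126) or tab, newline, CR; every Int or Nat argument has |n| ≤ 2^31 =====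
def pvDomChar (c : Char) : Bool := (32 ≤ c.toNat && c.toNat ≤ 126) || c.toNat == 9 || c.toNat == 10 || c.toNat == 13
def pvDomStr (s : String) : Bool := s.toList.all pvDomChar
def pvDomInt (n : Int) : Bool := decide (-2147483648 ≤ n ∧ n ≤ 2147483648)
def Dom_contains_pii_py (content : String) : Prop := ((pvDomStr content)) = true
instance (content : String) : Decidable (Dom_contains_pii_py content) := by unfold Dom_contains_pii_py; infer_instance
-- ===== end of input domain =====

-- B replaces seven substring scans over a lowercased copy by one in-place
-- case-insensitive position scan (objective: alternative, same asymptotic cost).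

-- ===== PORT A =====
-- A: lower the whole string, then `any(pattern in content_lower for pattern in pii_patterns)`.
def contains_pii_py (content : String) : Bool :=
  let pii_patterns : List String :=
    ["ssn", "social security", "credit card", "card number",
     "password", "secret", "bank account"]
  let content_lower := PySem.Str.lower content
  pii_patterns.any (fun pattern => PySem.Str.isIn pattern content_lower)

-- ===== PORT B =====
def pvPiiPatterns : List String :=
  ["ssn", "social security", "credit card", "card number",
   "password", "secret", "bank account"]

-- `all(content[i+k].lower() == p[k] for k in range(len(p)))` (with the i+len(p) <= n bound):
-- does p match case-insensitively at the front of cs?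
def pvMatchCI : List Char → List Char → Bool
  | [], _ => true
  | _ :: _, [] => false
  | p :: ps, c :: cs => (PySem.Chars.lowerChar c == p) && pvMatchCI ps cs

-- the `for i in range(n)` scan over positions
def pvScan : List Char → Bool
  | [] => false
  | c :: cs => pvPiiPatterns.any (fun p => pvMatchCI p.toList (c :: cs)) || pvScan cs

def contains_pii_py_alt (content : String) : Bool := pvScan content.toList

-- ===== PRECONDITION & SPEC =====
def Spec_contains_pii_py (content : String) (out : Bool) : Prop := out = contains_pii_py_alt content
instance (content : String) (out : Bool) : Decidable (Spec_contains_pii_py content out) := by unfold Spec_contains_pii_py; infer_instance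

-- ===== CLAIM (what is proved, stated in full; the proofs are below) =====
def Claim_equal_contains_pii_py : Prop := ∀ (content : String), Dom_contains_pii_py content → Spec_contains_pii_py content (contains_pii_py content)

-- ===== LEMMAS AND PROOFS =====

theorem pvMatchCI_iff (p cs : List Char) :
    pvMatchCI p cs = true ↔ p <+: PySem.Chars.lower cs := by
  induction p generalizing cs with
  | nil => simp [pvMatchCI]
  | cons a ps ih =>
    cases cs with
    | nil =>
      rw [show PySem.Chars.lower [] = [] from rfl]
      simp [pvMatchCI]
    | cons c cs =>
      rw [show PySem.Chars.lower (c :: cs) = PySem.Chars.lowerChar c :: PySem.Chars.lower cs from rfl]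
      simp only [pvMatchCI, Bool.and_eq_true, beq_iff_eq, List.cons_prefix_cons, ih]
      constructor <;> rintro ⟨h1, h2⟩ <;> exact ⟨h1.symm, h2⟩

theorem pvScan_iff (cs : List Char) :
    pvScan cs = true ↔ ∃ p ∈ pvPiiPatterns, p.toList <:+: PySem.Chars.lower cs := by
  induction cs with
  | nil =>
    simp only [pvScan, Bool.false_eq_true, false_iff]
    rintro ⟨p, hp, hinf⟩
    rw [show PySem.Chars.lower [] = [] from rfl, List.infix_nil] at hinf
    fin_cases hp <;> simp_all
  | cons c cs ih =>
    rw [show PySem.Chars.lower (c :: cs) = PySem.Chars.lowerChar c :: PySem.Chars.lower cs from rfl]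
    simp only [pvScan, Bool.or_eq_true, List.any_eq_true, pvMatchCI_iff, ih,
      List.infix_cons_iff]
    constructor
    · rintro (⟨p, hp, h⟩ | ⟨p, hp, h⟩)
      · exact ⟨p, hp, Or.inl (by rwa [show PySem.Chars.lower (c :: cs) = PySem.Chars.lowerChar c :: PySem.Chars.lower cs from rfl] at h)⟩
      · exact ⟨p, hp, Or.inr h⟩
    · rintro ⟨p, hp, h | h⟩
      · exact Or.inl ⟨p, hp, by rw [show PySem.Chars.lower (c :: cs) = PySem.Chars.lowerChar c :: PySem.Chars.lower cs from rfl]; exact h⟩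
      · exact Or.inr ⟨p, hp, h⟩

-- ===== VERDICT (by name: the statement is the Claim_ definition above) =====
theorem contains_pii_py_spec : Claim_equal_contains_pii_py := by
  intro content _
  show contains_pii_py content = contains_pii_py_alt content
  rw [Bool.eq_iff_iff]
  rw [show contains_pii_py content =
        (pvPiiPatterns.any fun p => PySem.Str.isIn p (PySem.Str.lower content)) from rfl]
  simp only [contains_pii_py_alt, pvScan_iff, List.any_eq_true,
    PySem.Str.isIn, PySem.Str.lower, String.toList_ofList, PySem.Chars.isIn_iff_infix]
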